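-- pv_equiv track=rewrite | github.com/Junaem/Algorithm_SSAFY | 0819/4873_반복문자지우기/s2.py | puyopuyo
-- ===== SOURCE A (Python) =====
-- def puyopuyo(st): # 아무리 생각해도 이게 진짜 정답이다. s1은 거짓된 풀이이다.
--     changed = True
--     ret = st # 이 문제에선 불필요하겠지만, 안정성을 위해 st를 복사하여 사용한다.
--     while changed: # 더 이상 변하지 않을 때까지 실행
--         changed = False
--         for i in range(len(ret) - 1): # 마지막 전까지의 글자를 돌며
--             if ret[i] == ret[i+1]: # 그 글자가 다음 글자와 같으면
--                 target = ret[i] # 그 글자를 타겟으로 삼고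
--                 cnt = 0 # 카운트를 셀 것이다.
--                 for j in range(len(ret)-i):
--                     if ret[i+j] == target: # 글자가 같은 동안 카운트를 세고
--                         cnt += 1
--                     else : # 다른 글자가 나오면 카운트를 멈춘다.
--                         break
--                 ret = ret[:i] + ret[i+cnt:] # 카운트한 부분을 잘라낸다.
--                 changed = True # 변화가 있었음을 표시하고,
--                 break # while 문을 다시 시작한다.
--     return len(ret)
-- ===== SOURCE B (Python) =====
-- def puyopuyo(st):
--     # one-pass stack of [char, count] run groups; pop a finished run (count>=2)
--     # when a different char arrives, letting its neighbours merge
--     stack = []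
--     for c in st:
--         while stack and stack[-1][0] != c and stack[-1][1] >= 2:
--             stack.pop()
--         if stack and stack[-1][0] == c:
--             stack[-1][1] += 1
--         else:
--             stack.append([c, 1])
--     while stack and stack[-1][1] >= 2:
--         stack.pop()
--     return sum(k for _, k in stack)
-- ===== Notes on version B (the rewrite author's own statement) =====
-- stated objective: faster
-- what changed: Replaced the restart-the-scan-after-every-deletion loop (rescan from index 0, slice out the run, repeat) by a single left-to-right pass over the string maintaining a stack of (char,count) run groups that pops finished runs and merges neighbours.
import Mathlib
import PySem

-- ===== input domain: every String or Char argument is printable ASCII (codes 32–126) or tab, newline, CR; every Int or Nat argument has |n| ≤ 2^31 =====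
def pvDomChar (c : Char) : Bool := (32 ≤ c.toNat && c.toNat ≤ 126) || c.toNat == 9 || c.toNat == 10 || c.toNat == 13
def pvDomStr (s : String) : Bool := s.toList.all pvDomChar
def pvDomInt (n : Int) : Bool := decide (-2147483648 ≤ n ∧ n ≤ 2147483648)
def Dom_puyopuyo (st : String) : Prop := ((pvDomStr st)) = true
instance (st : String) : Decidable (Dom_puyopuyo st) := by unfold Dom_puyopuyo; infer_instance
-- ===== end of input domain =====

-- B replaces A's rescan-from-zero deletion loop by one linear pass with a stack of (char,count) run groups.

-- ===== PORT A =====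
-- inner `for j` loop: count how many chars equal to `target` start the suffix, breaking at the first mismatch
def countRun (l : List Char) (target : Char) : Nat :=
  match l with
  | [] => 0
  | c :: rest => if c = target then countRun rest target + 1 else 0

-- inner `for i` loop: walk until ret[i] == ret[i+1]; there, cut the counted run (ret[:i] + ret[i+cnt:])
def scanA : List Char → Option (List Char)
  | [] => none
  | [_] => none
  | c1 :: c2 :: rest =>
      if c1 = c2 then some ((c1 :: c2 :: rest).drop (countRun (c1 :: c2 :: rest) c1))
      else (scanA (c2 :: rest)).map (c1 :: ·)

-- termination fact for the `while changed` loop: each cut removes at least the two equal chars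
theorem scanA_some_length : ∀ {l r : List Char}, scanA l = some r → r.length < l.length
  | [], _, h => by simp [scanA] at h
  | [_], _, h => by simp [scanA] at h
  | c1 :: c2 :: rest, r, h => by
      by_cases hc : c1 = c2
      · simp only [scanA, if_pos hc, Option.some.injEq] at h
        have hcnt : 2 ≤ countRun (c1 :: c2 :: rest) c1 := by
          simp [countRun, hc]
        subst h
        simp only [List.length_drop, List.length_cons]
        omega
      · simp only [scanA, if_neg hc, Option.map_eq_some_iff] at h
        obtain ⟨r', hr', rfl⟩ := h
        have := scanA_some_length hr'
        simpa using Nat.succ_lt_succ this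

-- `while changed:` — repeat the scan-and-cut until no adjacent pair remains
def loopA (ret : List Char) : List Char :=
  match h : scanA ret with
  | some r => loopA r
  | none => ret
termination_by ret.length
decreasing_by exact scanA_some_length h

def puyopuyo (st : String) : Int := ((loopA st.toList).length : Int)

-- ===== PORT B =====
-- push one char: pop finished runs (count >= 2) of a different char, then merge or start a group
def pushB : List (Char × Int) → Char → List (Char × Int)
  | [], c => [(c, 1)]
  | (d, k) :: rest, c =>
      if d = c then (d, k + 1) :: rest
      else if 2 ≤ k then pushB rest c
      else (c, 1) :: (d, k) :: rest

-- trailing cleanup: pop finished runs left on top at end of input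
def finB : List (Char × Int) → List (Char × Int)
  | [] => []
  | (d, k) :: rest => if 2 ≤ k then finB rest else (d, k) :: rest

def puyopuyo_alt (st : String) : Int :=
  (finB (st.toList.foldl pushB [])).foldl (fun s p => s + p.2) 0

-- ===== PRECONDITION & SPEC =====
def Spec_puyopuyo (st : String) (out : Int) : Prop := out = puyopuyo_alt st
instance (st : String) (out : Int) : Decidable (Spec_puyopuyo st out) := by unfold Spec_puyopuyo; infer_instance

-- ===== CLAIM (what is proved, stated in full; the proofs are below) =====
def Claim_equal_puyopuyo : Prop := ∀ (st : String), Dom_puyopuyo st → Spec_puyopuyo st (puyopuyo st)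

-- ===== LEMMAS AND PROOFS =====

-- abbreviation used only in proofs: the stack after the whole pass
def stackOf (l : List Char) : List (Char × Int) := l.foldl pushB []

theorem loopA_some {l r : List Char} (h : scanA l = some r) : loopA l = loopA r := by
  rw [loopA]
  split
  · next r' h' => rw [h] at h'; cases h'; rfl
  · next h' => rw [h] at h'; cases h'

theorem loopA_none {l : List Char} (h : scanA l = none) : loopA l = l := by
  rw [loopA]
  split
  · next r' h' => rw [h] at h'; cases h'
  · rfl

-- A run-free string yields one singleton group per char (top of stack = head of list).
theorem foldl_push_runfree (p : List Char) : ∀ (a : Char) (T : List (Char × Int)),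
    List.IsChain (· ≠ ·) (a :: p) →
    List.foldl pushB ((a, 1) :: T) p = (p.map (fun x => (x, (1 : Int)))).reverse ++ (a, 1) :: T := by
  induction p with
  | nil => intro a T _; simp
  | cons b p' ih =>
      intro a T h
      have hab : a ≠ b := (List.isChain_cons_cons.mp h).1
      have h' : List.IsChain (· ≠ ·) (b :: p') := (List.isChain_cons_cons.mp h).2
      have hpush : pushB ((a, 1) :: T) b = (b, 1) :: (a, 1) :: T := by
        simp [pushB, hab]
      simp only [List.foldl_cons, hpush, ih b ((a, 1) :: T) h', List.map_cons,
        List.reverse_cons, List.append_assoc]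
      rfl

theorem stackOf_runfree (l : List Char) (h : List.IsChain (· ≠ ·) l) :
    stackOf l = (l.map (fun x => (x, (1 : Int)))).reverse := by
  cases l with
  | nil => rfl
  | cons a p =>
      have h0 : pushB [] a = [(a, 1)] := rfl
      simp only [stackOf, List.foldl_cons, h0, foldl_push_runfree p a [] h,
        List.map_cons, List.reverse_cons]

theorem push_replicate : ∀ (m : Nat) (c : Char) (j : Int) (T : List (Char × Int)),
    List.foldl pushB ((c, j) :: T) (List.replicate m c) = (c, j + m) :: T := by
  intro m
  induction m with
  | zero => intro c j T; simp
  | succ m' ih =>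
      intro c j T
      have hpush : pushB ((c, j) :: T) c = (c, j + 1) :: T := by simp [pushB]
      simp only [List.replicate_succ, List.foldl_cons, hpush, ih]
      congr 1
      push_cast
      ring_nf

-- After a run-free prefix p (whose last char differs from c), pushing c^k stacks the single group (c,k).
theorem stackOf_append_run (p : List Char) (c : Char) (k : Nat) (hk : 1 ≤ k)
    (h : List.IsChain (· ≠ ·) (p ++ [c])) :
    stackOf (p ++ List.replicate k c) = (c, (k : Int)) :: stackOf p := by
  have hp : List.IsChain (· ≠ ·) p := h.left_of_append
  have hpushc : pushB (stackOf p) c = (c, 1) :: stackOf p := by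
    rcases List.eq_nil_or_concat p with rfl | ⟨p₀, b, rfl⟩
    · rfl
    · have hbc : b ≠ c := by
        have h2 := h
        rw [List.concat_eq_append, List.isChain_append] at h2
        simpa using h2.2.2 b (by simp) c rfl
      rw [stackOf_runfree _ hp]
      simp [pushB, List.concat_eq_append, hbc]
  obtain ⟨k', rfl⟩ : ∃ k', k = k' + 1 := ⟨k - 1, by omega⟩
  rw [stackOf, List.foldl_append, List.replicate_succ, List.foldl_cons]
  show List.foldl pushB (pushB (stackOf p) c) (List.replicate k' c) = _
  rw [hpushc, push_replicate]
  congr 2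
  push_cast
  ring

-- the counted run is exactly the leading block of the target char, the next char differs
theorem countRun_spec : ∀ (l : List Char) (c : Char),
    l = List.replicate (countRun l c) c ++ l.drop (countRun l c) ∧
    (∀ d ∈ (l.drop (countRun l c)).head?, d ≠ c) := by
  intro l
  induction l with
  | nil => intro c; simp [countRun]
  | cons a rest ih =>
      intro c
      by_cases hac : a = c
      · subst hac
        have h1 := (ih a).1
        have h2 := (ih a).2
        constructor
        · simp only [countRun]
          exact congrArg (a :: ·) h1
        · simpa [countRun] using h2
      · constructor
        · simp [countRun, hac]
        · simp only [countRun, if_neg hac, List.drop_zero, List.head?_cons]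
          intro d hd
          cases hd
          exact hac

-- decomposition of one cut of A: l = p ++ c^k ++ q, result p ++ q, the cut run is maximal
theorem scanA_decomp : ∀ (l r : List Char), scanA l = some r →
    ∃ p c k q, l = p ++ List.replicate k c ++ q ∧ r = p ++ q ∧ 2 ≤ k ∧
      List.IsChain (· ≠ ·) (p ++ [c]) ∧ (∀ d ∈ q.head?, d ≠ c)
  | [], r, h => by simp [scanA] at h
  | [_], r, h => by simp [scanA] at h
  | c1 :: c2 :: rest, r, h => by
      by_cases hc : c1 = c2
      · simp only [scanA, if_pos hc, Option.some.injEq] at h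
        refine ⟨[], c1, countRun (c1 :: c2 :: rest) c1,
          (c1 :: c2 :: rest).drop (countRun (c1 :: c2 :: rest) c1), ?_, ?_, ?_, ?_, ?_⟩
        · simpa using (countRun_spec (c1 :: c2 :: rest) c1).1
        · simpa using h.symm
        · simp [countRun, hc]
        · simp
        · exact (countRun_spec (c1 :: c2 :: rest) c1).2
      · simp only [scanA, if_neg hc, Option.map_eq_some_iff] at h
        obtain ⟨r', hr', rfl⟩ := h
        obtain ⟨p', c, k, q, hl, hr, hk, hch, hq⟩ := scanA_decomp (c2 :: rest) r' hr'
        refine ⟨c1 :: p', c, k, q, by simpa using congrArg (c1 :: ·) hl, by simp [hr], hk, ?_, hq⟩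
        have hhead : (p' ++ [c]).head? = some c2 := by
          cases p' with
          | nil =>
              obtain ⟨k', rfl⟩ : ∃ k', k = k' + 1 := ⟨k - 1, by omega⟩
              simp only [List.nil_append, List.replicate_succ, List.cons_append,
                List.cons.injEq] at hl
              simp [hl.1]
          | cons x xs =>
              simp only [List.cons_append, List.cons.injEq, List.append_assoc] at hl
              simp [hl.1]
        rw [List.cons_append] at *
        rw [List.isChain_cons]
        exact ⟨fun y hy => by rw [hhead] at hy; cases hy; exact hc, hch⟩

-- one cut of A does not change what finB leaves on the stack
theorem stack_step (l r : List Char) (h : scanA l = some r) :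
    finB (stackOf l) = finB (stackOf r) := by
  obtain ⟨p, c, k, q, rfl, rfl, hk, hch, hq⟩ := scanA_decomp l r h
  cases q with
  | nil =>
      rw [List.append_nil, List.append_nil, stackOf_append_run p c k (by omega) hch]
      simp [finB, show (2 : Int) ≤ k by exact_mod_cast hk]
  | cons d q' =>
      have hdc : d ≠ c := hq d rfl
      have hrun : stackOf (p ++ List.replicate k c) = (c, (k : Int)) :: stackOf p :=
        stackOf_append_run p c k (by omega) hch
      have hstacks : stackOf (p ++ List.replicate k c ++ (d :: q')) = stackOf (p ++ d :: q') := by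
        rw [stackOf, List.foldl_append]
        show List.foldl pushB (stackOf (p ++ List.replicate k c)) (d :: q') = _
        rw [hrun, List.foldl_cons]
        have hpop : pushB ((c, (k : Int)) :: stackOf p) d = pushB (stackOf p) d := by
          simp [pushB, (Ne.symm hdc), show (2 : Int) ≤ k by exact_mod_cast hk]
        rw [hpop]
        conv_rhs => rw [stackOf, List.foldl_append, List.foldl_cons]
        rfl
      rw [hstacks]

-- scanA finds nothing iff no adjacent equal pair remains
theorem scanA_none_chain : ∀ (l : List Char), scanA l = none → List.IsChain (· ≠ ·) l
  | [], _ => List.IsChain.nil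
  | [c], _ => List.IsChain.singleton c
  | c1 :: c2 :: rest, h => by
      by_cases hc : c1 = c2
      · simp [scanA, hc] at h
      · simp only [scanA, if_neg hc, Option.map_eq_none_iff] at h
        exact List.isChain_cons_cons.mpr ⟨hc, scanA_none_chain (c2 :: rest) h⟩

-- finB is the identity on a stack whose groups all have count 1
theorem finB_ones (t : List Char) :
    finB ((t.map (fun x => (x, (1 : Int)))).reverse)
      = (t.map (fun x => (x, (1 : Int)))).reverse := by
  rcases List.eq_nil_or_concat t with rfl | ⟨t₀, b, rfl⟩
  · rfl
  · simp [finB, List.concat_eq_append]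

-- the stack after the pass, cleaned by finB, is the reverse of A's final run-free string as singleton groups
theorem loop_stack (l : List Char) :
    finB (stackOf l) = ((loopA l).map (fun x => (x, (1 : Int)))).reverse := by
  induction hn : l.length using Nat.strong_induction_on generalizing l with
  | _ n ih =>
    cases h : scanA l with
    | some r =>
        rw [stack_step l r h, loopA_some h]
        exact ih r.length (hn ▸ scanA_some_length h) r rfl
    | none =>
        rw [loopA_none h, stackOf_runfree l (scanA_none_chain l h), finB_ones]

-- summing the counts of a stack is a fold; expose it as a sum of the second components
theorem foldl_sum_snd (t : List (Char × Int)) : ∀ (a : Int),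
    t.foldl (fun s p => s + p.2) a = a + (t.map Prod.snd).sum := by
  induction t with
  | nil => intro a; simp
  | cons x t' ih => intro a; simp [ih]; ring

-- ===== VERDICT (by name: the statement is the Claim_ definition above) =====
theorem puyopuyo_spec : Claim_equal_puyopuyo := by
  intro st _
  unfold Spec_puyopuyo puyopuyo puyopuyo_alt
  rw [show st.toList.foldl pushB [] = stackOf st.toList from rfl, loop_stack st.toList,
    foldl_sum_snd]
  simp only [List.map_reverse, List.sum_reverse, List.map_map, zero_add]
  rw [show (Prod.snd ∘ fun x : Char => (x, (1 : Int))) = fun _ => (1 : Int) from rfl,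
    PySem.List.sum_map_const_int]
  ring
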